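-- pv_equiv track=rewrite | github.com/dannya123-blm/MajorIndividualProject | just-apply/api/uploads/server.py | build_search_query_from_skills
-- ===== SOURCE A (Python) =====
-- def build_search_query_from_skills(skills: list[str], career_target: str = "") -> str:
--     if career_target:
--         mapping = {
--             "Data Analyst": "data analyst",
--             "Frontend Developer": "frontend developer",
--             "Cloud Engineer": "cloud engineer",
--             "Software Engineer": "software engineer",
--             "Full Stack Developer": "full stack developer",
--             "UI/UX Designer": "ui ux designer",
--         }
--         if career_target in mapping:
--             return mapping[career_target]
--
--     lowered_skills = [str(skill).lower().strip() for skill in skills]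
--
--     if any(
--         skill in lowered_skills
--         for skill in ["python", "sql", "data analysis", "data analytics", "power bi", "machine learning"]
--     ):
--         return "data analyst"
--
--     if any(
--         skill in lowered_skills
--         for skill in ["react", "javascript", "typescript", "html", "css", "ui", "ux", "figma"]
--     ):
--         return "frontend developer"
--
--     if any(
--         skill in lowered_skills
--         for skill in ["aws", "azure", "cloud", "docker", "kubernetes", "terraform", "devops"]
--     ):
--         return "cloud engineer"
--
--     if any(
--         skill in lowered_skills
--         for skill in ["django", "flask", "java", "node.js", "c#", "c++"]
--     ):
--         return "software engineer"
--
--     return "software engineer"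
-- ===== SOURCE B (Python) =====
-- _CATEGORY_KEYWORDS = [
--     ["python", "sql", "data analysis", "data analytics", "power bi", "machine learning"],
--     ["react", "javascript", "typescript", "html", "css", "ui", "ux", "figma"],
--     ["aws", "azure", "cloud", "docker", "kubernetes", "terraform", "devops"],
--     ["django", "flask", "java", "node.js", "c#", "c++"],
-- ]
-- _LABELS = ["data analyst", "frontend developer", "cloud engineer", "software engineer"]
-- _RANK = {kw: rank for rank, kws in enumerate(_CATEGORY_KEYWORDS) for kw in kws}
--
--
-- def build_search_query_from_skills(skills: list[str], career_target: str = "") -> str: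
--     if career_target:
--         mapping = {
--             "Data Analyst": "data analyst",
--             "Frontend Developer": "frontend developer",
--             "Cloud Engineer": "cloud engineer",
--             "Software Engineer": "software engineer",
--             "Full Stack Developer": "full stack developer",
--             "UI/UX Designer": "ui ux designer",
--         }
--         if career_target in mapping:
--             return mapping[career_target]
--
--     best = None
--     for skill in skills:
--         rank = _RANK.get(str(skill).lower().strip())
--         if rank is not None and (best is None or rank < best):
--             best = rank
--     return "software engineer" if best is None else _LABELS[best]
-- ===== Notes on version B (the rewrite author's own statement) =====
-- stated objective: faster
-- what changed: Inverts the traversal: instead of four per-category passes each testing every keyword for membership in the whole lowered-skills list, B builds one keyword->rank dict once and scans the skills a single time tracking the minimum matched rank, mapping it back to its label (default 'software engineer' when nothing matches).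
import Mathlib
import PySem

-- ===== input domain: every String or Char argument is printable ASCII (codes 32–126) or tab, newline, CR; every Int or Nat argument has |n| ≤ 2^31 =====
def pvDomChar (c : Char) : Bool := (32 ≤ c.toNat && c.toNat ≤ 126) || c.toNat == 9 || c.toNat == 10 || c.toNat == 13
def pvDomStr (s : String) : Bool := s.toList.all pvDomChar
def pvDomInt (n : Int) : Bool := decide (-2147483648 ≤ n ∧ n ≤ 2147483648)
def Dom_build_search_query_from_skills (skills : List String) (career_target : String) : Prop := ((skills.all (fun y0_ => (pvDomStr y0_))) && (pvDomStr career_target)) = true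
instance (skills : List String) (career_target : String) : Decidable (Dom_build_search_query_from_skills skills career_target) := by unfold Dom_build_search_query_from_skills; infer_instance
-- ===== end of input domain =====

-- B replaces A's four per-category membership passes by one keyword->rank dict and a single
-- minimum-rank scan over the skills (alternative decomposition, same result).


-- ===== PORT A =====
def pvMappingA : PySem.Dict String String := PySem.Dict.ofList
  [("Data Analyst", "data analyst"), ("Frontend Developer", "frontend developer"),
   ("Cloud Engineer", "cloud engineer"), ("Software Engineer", "software engineer"),
   ("Full Stack Developer", "full stack developer"), ("UI/UX Designer", "ui ux designer")]

def pvBodyA (skills : List String) : String :=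
  let lowered := skills.map (fun skill => PySem.Str.strip (PySem.Str.lower skill))
  if (["python", "sql", "data analysis", "data analytics", "power bi", "machine learning"]).any
       (fun skill => lowered.contains skill) then "data analyst"
  else if (["react", "javascript", "typescript", "html", "css", "ui", "ux", "figma"]).any
       (fun skill => lowered.contains skill) then "frontend developer"
  else if (["aws", "azure", "cloud", "docker", "kubernetes", "terraform", "devops"]).any
       (fun skill => lowered.contains skill) then "cloud engineer"
  else if (["django", "flask", "java", "node.js", "c#", "c++"]).any
       (fun skill => lowered.contains skill) then "software engineer"
  else "software engineer"

def build_search_query_from_skills (skills : List String) (career_target : String) : String :=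
  if career_target ≠ "" ∧ pvMappingA.contains career_target then
    pvMappingA.getD career_target ""
  else pvBodyA skills

-- ===== PORT B =====
def pvMappingB : PySem.Dict String String := PySem.Dict.ofList
  [("Data Analyst", "data analyst"), ("Frontend Developer", "frontend developer"),
   ("Cloud Engineer", "cloud engineer"), ("Software Engineer", "software engineer"),
   ("Full Stack Developer", "full stack developer"), ("UI/UX Designer", "ui ux designer")]

def pvCategoryKeywords : List (List String) :=
  [["python", "sql", "data analysis", "data analytics", "power bi", "machine learning"],
   ["react", "javascript", "typescript", "html", "css", "ui", "ux", "figma"],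
   ["aws", "azure", "cloud", "docker", "kubernetes", "terraform", "devops"],
   ["django", "flask", "java", "node.js", "c#", "c++"]]

def pvLabels : List String :=
  ["data analyst", "frontend developer", "cloud engineer", "software engineer"]

def pvRank : PySem.Dict String Int :=
  (PySem.List.enumerate pvCategoryKeywords 0).foldl
    (fun d p => p.2.foldl (fun d kw => d.insert kw p.1) d) PySem.Dict.empty

def pvStepB (best : Option Int) (skill : String) : Option Int :=
  match pvRank.get? (PySem.Str.strip (PySem.Str.lower skill)) with
  | none => best
  | some r =>
    match best with
    | none => some r
    | some b => if r < b then some r else some b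

def build_search_query_from_skills_alt (skills : List String) (career_target : String) : String :=
  if career_target ≠ "" ∧ pvMappingB.contains career_target then
    pvMappingB.getD career_target ""
  else
    match skills.foldl pvStepB none with
    | none => "software engineer"
    | some b => PySem.List.pyGetD pvLabels b "software engineer"

-- ===== PRECONDITION & SPEC =====
def Spec_build_search_query_from_skills (skills : List String) (career_target : String) (out : String) : Prop := out = build_search_query_from_skills_alt skills career_target
instance (skills : List String) (career_target : String) (out : String) : Decidable (Spec_build_search_query_from_skills skills career_target out) := by unfold Spec_build_search_query_from_skills; infer_instance

-- ===== CLAIM (what is proved, stated in full; the proofs are below) =====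
def Claim_equal_build_search_query_from_skills : Prop := ∀ (skills : List String) (career_target : String), Dom_build_search_query_from_skills skills career_target → Spec_build_search_query_from_skills skills career_target (build_search_query_from_skills skills career_target)

-- ===== LEMMAS AND PROOFS =====

def pvNorm (s : String) : String := PySem.Str.strip (PySem.Str.lower s)

def pvK0 : List String := ["python", "sql", "data analysis", "data analytics", "power bi", "machine learning"]
def pvK1 : List String := ["react", "javascript", "typescript", "html", "css", "ui", "ux", "figma"]
def pvK2 : List String := ["aws", "azure", "cloud", "docker", "kubernetes", "terraform", "devops"]
def pvK3 : List String := ["django", "flask", "java", "node.js", "c#", "c++"]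

-- keyword->rank dict characterized by the four lists
theorem pvRank_char (s : String) :
    pvRank.get? s =
      if pvK0.contains s then some 0
      else if pvK1.contains s then some 1
      else if pvK2.contains s then some 2
      else if pvK3.contains s then some 3
      else none := by
  by_cases h0 : pvK0.contains s
  · simp only [h0, if_true]
    simp only [pvK0, List.contains_eq_mem, List.mem_cons, List.not_mem_nil, or_false,
      decide_eq_true_eq] at h0
    rcases h0 with h | h | h | h | h | h <;> subst h <;> decide
  by_cases h1 : pvK1.contains s
  · simp only [h0, h1, if_true]
    simp only [pvK1, List.contains_eq_mem, List.mem_cons, List.not_mem_nil, or_false,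
      decide_eq_true_eq] at h1
    rcases h1 with h | h | h | h | h | h | h | h <;> subst h <;> decide
  by_cases h2 : pvK2.contains s
  · simp only [h0, h1, h2, if_true]
    simp only [pvK2, List.contains_eq_mem, List.mem_cons, List.not_mem_nil, or_false,
      decide_eq_true_eq] at h2
    rcases h2 with h | h | h | h | h | h | h <;> subst h <;> decide
  by_cases h3 : pvK3.contains s
  · simp only [h0, h1, h2, h3, if_true]
    simp only [pvK3, List.contains_eq_mem, List.mem_cons, List.not_mem_nil, or_false,
      decide_eq_true_eq] at h3
    rcases h3 with h | h | h | h | h | h <;> subst h <;> decide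
  · simp only [h0, h1, h2, h3, Bool.false_eq_true, if_false]
    rw [PySem.Dict.get?_eq_none_iff_not_mem_keys]
    have hkeys : pvRank.keys = pvK0 ++ pvK1 ++ pvK2 ++ pvK3 := by decide
    rw [hkeys]
    simp only [List.contains_eq_mem, decide_eq_true_eq] at h0 h1 h2 h3
    simp [h0, h1, h2, h3]

-- option-minimum combinator the scan accumulates
def pvOmin : Option Int → Option Int → Option Int
  | none, b => b
  | some r, none => some r
  | some r, some b => if r < b then some r else some b

theorem pvStepB_eq (best : Option Int) (skill : String) :
    pvStepB best skill = pvOmin best (pvRank.get? (pvNorm skill)) := by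
  unfold pvStepB pvOmin pvNorm
  rcases pvRank.get? (PySem.Str.strip (PySem.Str.lower skill)) with _ | r <;>
    rcases best with _ | b <;> simp only [] <;> split_ifs <;>
      first | rfl | (simp only [Option.some.injEq]; omega) | omega | omega

theorem pvOmin_assoc (a b c : Option Int) :
    pvOmin (pvOmin a b) c = pvOmin a (pvOmin b c) := by
  rcases a with _ | a <;> rcases b with _ | b <;> rcases c with _ | c <;>
    simp only [pvOmin] <;> (try (split_ifs <;> simp only [pvOmin])) <;> (try split_ifs) <;>
      first | rfl | (simp only [Option.some.injEq]; omega) | omega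

theorem pvFold_acc (xs : List String) :
    ∀ acc : Option Int, xs.foldl pvStepB acc = pvOmin acc (xs.foldl pvStepB none) := by
  induction xs with
  | nil => intro acc; cases acc <;> rfl
  | cons x xs ih =>
    intro acc
    simp only [List.foldl_cons]
    rw [ih (pvStepB acc x), ih (pvStepB none x), pvStepB_eq, pvStepB_eq,
      show pvOmin none (pvRank.get? (pvNorm x)) = pvRank.get? (pvNorm x) by cases pvRank.get? (pvNorm x) <;> rfl,
      pvOmin_assoc]

-- the scan computes the minimum matched rank; characterize it by the four any-tests
set_option maxHeartbeats 1000000 in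
theorem pvFold_char (xs : List String) :
    xs.foldl pvStepB none =
      if xs.any (fun x => pvK0.contains (pvNorm x)) then some 0
      else if xs.any (fun x => pvK1.contains (pvNorm x)) then some 1
      else if xs.any (fun x => pvK2.contains (pvNorm x)) then some 2
      else if xs.any (fun x => pvK3.contains (pvNorm x)) then some 3
      else none := by
  induction xs with
  | nil => rfl
  | cons x xs ih =>
    simp only [List.foldl_cons, List.any_cons]
    rw [pvFold_acc, ih, pvStepB_eq]
    rw [show pvOmin none (pvRank.get? (pvNorm x)) = pvRank.get? (pvNorm x) by cases pvRank.get? (pvNorm x) <;> rfl]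
    rw [pvRank_char]
    by_cases h0 : pvK0.contains (pvNorm x) <;>
      by_cases h1 : pvK1.contains (pvNorm x) <;>
        by_cases h2 : pvK2.contains (pvNorm x) <;>
          by_cases h3 : pvK3.contains (pvNorm x) <;>
            simp only [h0, h1, h2, h3, if_true, Bool.true_or, Bool.false_or] <;>
              split_ifs <;> first | rfl | (exfalso; simp_all)

theorem pvBodyA_eq (skills : List String) :
    pvBodyA skills =
      (if (pvK0.any fun k => ((skills.map pvNorm).contains k)) then "data analyst"
       else if (pvK1.any fun k => ((skills.map pvNorm).contains k)) then "frontend developer"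
       else if (pvK2.any fun k => ((skills.map pvNorm).contains k)) then "cloud engineer"
       else if (pvK3.any fun k => ((skills.map pvNorm).contains k)) then "software engineer"
       else "software engineer") := rfl

-- A's any-over-keywords test equals B's any-over-skills test
theorem pvAny_comm (ks : List String) (xs : List String) :
    (ks.any fun k => (xs.map pvNorm).contains k) = (xs.any fun x => ks.contains (pvNorm x)) := by
  rw [Bool.eq_iff_iff]
  simp only [List.any_eq_true, List.contains_eq_mem, List.mem_map, decide_eq_true_eq]
  constructor
  · rintro ⟨k, hk, x, hx, rfl⟩; exact ⟨x, hx, hk⟩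
  · rintro ⟨x, hx, hk⟩; exact ⟨pvNorm x, hk, x, hx, rfl⟩

-- ===== VERDICT (by name: the statement is the Claim_ definition above) =====
theorem build_search_query_from_skills_spec : Claim_equal_build_search_query_from_skills := by
  intro skills career_target _
  unfold Spec_build_search_query_from_skills
  unfold build_search_query_from_skills build_search_query_from_skills_alt
  have hAB : pvMappingA = pvMappingB := rfl
  rw [hAB]
  by_cases h : career_target ≠ "" ∧ pvMappingB.contains career_target
  · rw [if_pos h, if_pos h]
  · rw [if_neg h, if_neg h]
    rw [pvFold_char, pvBodyA_eq]
    rw [pvAny_comm pvK0, pvAny_comm pvK1, pvAny_comm pvK2, pvAny_comm pvK3]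
    split_ifs <;> rfl
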